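-- pv_equiv track=rewrite | github.com/gilankpam/adaptive-link | ground-station/ml/optimize_params.py | _expand_param_tokens
-- ===== SOURCE A (Python) =====
-- PARAM_REGISTRY = [
--     ('hold_fallback_mode_ms',            'profile selection', 'int',     200,  5000, None),
--     ('hold_modes_down_ms',               'profile selection', 'int',     500, 10000, None),
--     ('min_between_changes_ms',           'profile selection', 'int',      50,  1000, None),
--     ('upward_confidence_loops',          'profile selection', 'int',       1,    10, None),
--     ('fast_downgrade',                   'profile selection', 'cat',    None,  None, [True, False]),
--     ('hysteresis_up_db',                 'gate',              'float',   0.5,   6.0, None),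
--     ('hysteresis_down_db',               'gate',              'float',   0.0,   4.0, None),
--     ('snr_slope_alpha',                  'gate',              'float',  0.05,   0.8, None),
--     ('snr_predict_horizon_ticks',        'gate',              'float',   0.0,  10.0, None),
--     ('emergency_loss_rate',              'gate',              'float',  0.05,  0.35, None),
--     ('emergency_fec_pressure',           'gate',              'float',   0.4,  0.95, None),
--     ('snr_safety_margin',                'dynamic',           'float',   1.0,   8.0, None),
--     ('snr_ema_alpha',                    'dynamic',           'float',  0.05,   0.8, None),
--     ('loss_margin_weight',               'dynamic',           'float',   5.0,  50.0, None),
--     ('fec_margin_weight',                'dynamic',           'float',   1.0,  15.0, None),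
--     ('max_mcs',                          'dynamic',           'int',       2,  None, None),
--     ('short_gi_snr_margin',              'dynamic',           'float',   2.0,  10.0, None),
--     ('loss_threshold_for_fec_downgrade', 'dynamic',           'float',  0.01,  0.15, None),
--     ('fec_redundancy_ratio',             'dynamic',           'float',  0.15,  0.40, None),
--     ('utilization_factor',               'dynamic',           'float',   0.2,   0.7, None),
--     ('max_bitrate',                      'dynamic',           'int',   15000, 40000, None),
--     ('min_bitrate',                      'dynamic',           'int',    1000,  5000, None),
--     ('max_power',                        'dynamic',           'int',    1000,  2900, None),
--     ('min_power',                        'dynamic',           'int',      50,  1000, None),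
-- ]
--
-- ALL_PARAM_NAMES = {p[0] for p in PARAM_REGISTRY}
--
-- _SECTION_ALIAS = {
--     'profile_selection': 'profile selection',
--     'profile-selection': 'profile selection',
--     'gate': 'gate',
--     'dynamic': 'dynamic',
-- }
--
-- def _expand_param_tokens(spec_str):
--     """Expand a comma-separated CLI string into a set of parameter names.
--
--     Accepts individual names and section shorthands from _SECTION_ALIAS.
--     Raises SystemExit on unknown tokens.
--     """
--     selected = set()
--     unknown = []
--     for tok in (t.strip() for t in spec_str.split(',') if t.strip()):
--         if tok in _SECTION_ALIAS:
--             section = _SECTION_ALIAS[tok]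
--             selected.update(p[0] for p in PARAM_REGISTRY if p[1] == section)
--         elif tok in ALL_PARAM_NAMES:
--             selected.add(tok)
--         else:
--             unknown.append(tok)
--     if unknown:
--         raise SystemExit(
--             f"Unknown parameter(s): {', '.join(unknown)}. "
--             f"Run --list-params to see valid names."
--         )
--     return selected
-- ===== SOURCE B (Python) =====
-- PARAM_REGISTRY = [
--     ('hold_fallback_mode_ms',            'profile selection', 'int',     200,  5000, None),
--     ('hold_modes_down_ms',               'profile selection', 'int',     500, 10000, None),
--     ('min_between_changes_ms',           'profile selection', 'int',      50,  1000, None),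
--     ('upward_confidence_loops',          'profile selection', 'int',       1,    10, None),
--     ('fast_downgrade',                   'profile selection', 'cat',    None,  None, [True, False]),
--     ('hysteresis_up_db',                 'gate',              'float',   0.5,   6.0, None),
--     ('hysteresis_down_db',               'gate',              'float',   0.0,   4.0, None),
--     ('snr_slope_alpha',                  'gate',              'float',  0.05,   0.8, None),
--     ('snr_predict_horizon_ticks',        'gate',              'float',   0.0,  10.0, None),
--     ('emergency_loss_rate',              'gate',              'float',  0.05,  0.35, None),
--     ('emergency_fec_pressure',           'gate',              'float',   0.4,  0.95, None),
--     ('snr_safety_margin',                'dynamic',           'float',   1.0,   8.0, None),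
--     ('snr_ema_alpha',                    'dynamic',           'float',  0.05,   0.8, None),
--     ('loss_margin_weight',               'dynamic',           'float',   5.0,  50.0, None),
--     ('fec_margin_weight',                'dynamic',           'float',   1.0,  15.0, None),
--     ('max_mcs',                          'dynamic',           'int',       2,  None, None),
--     ('short_gi_snr_margin',              'dynamic',           'float',   2.0,  10.0, None),
--     ('loss_threshold_for_fec_downgrade', 'dynamic',           'float',  0.01,  0.15, None),
--     ('fec_redundancy_ratio',             'dynamic',           'float',  0.15,  0.40, None),
--     ('utilization_factor',               'dynamic',           'float',   0.2,   0.7, None),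
--     ('max_bitrate',                      'dynamic',           'int',   15000, 40000, None),
--     ('min_bitrate',                      'dynamic',           'int',    1000,  5000, None),
--     ('max_power',                        'dynamic',           'int',    1000,  2900, None),
--     ('min_power',                        'dynamic',           'int',      50,  1000, None),
-- ]
--
-- _SECTION_ALIAS = {
--     'profile_selection': 'profile selection',
--     'profile-selection': 'profile selection',
--     'gate': 'gate',
--     'dynamic': 'dynamic',
-- }
--
--
-- def _expand_param_tokens(spec_str):
--     """Expand a comma-separated CLI string into a set of parameter names.
--
--     One expansion table is built up front (alias -> its section's names,
--     name -> [name]); each token then needs a single dict lookup instead of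
--     a rescan of PARAM_REGISTRY.
--     """
--     by_section = {}
--     for p in PARAM_REGISTRY:
--         by_section.setdefault(p[1], []).append(p[0])
--     expansion = {alias: by_section.get(alias_section, [])
--                  for alias, alias_section in _SECTION_ALIAS.items()}
--     for p in PARAM_REGISTRY:
--         expansion[p[0]] = [p[0]]
--
--     selected = set()
--     unknown = []
--     for t in spec_str.split(','):
--         tok = t.strip()
--         if not tok:
--             continue
--         names = expansion.get(tok)
--         if names is None:
--             unknown.append(tok)
--         else:
--             selected.update(names)
--     if unknown:
--         raise SystemExit(
--             f"Unknown parameter(s): {', '.join(unknown)}. "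
--             f"Run --list-params to see valid names."
--         )
--     return selected
-- ===== Notes on version B (the rewrite author's own statement) =====
-- stated objective: alternative
-- what changed: B precomputes a single expansion dict (alias -> its section's parameter names, name -> [name]) once, so each token is resolved by one dict lookup instead of A's per-token branch chain with a rescan of PARAM_REGISTRY on every section alias.
-- outside the precondition, e.g. on _expand_param_tokens('gate, bogus'): A raises SystemExit, B raises SystemExit
import Mathlib
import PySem

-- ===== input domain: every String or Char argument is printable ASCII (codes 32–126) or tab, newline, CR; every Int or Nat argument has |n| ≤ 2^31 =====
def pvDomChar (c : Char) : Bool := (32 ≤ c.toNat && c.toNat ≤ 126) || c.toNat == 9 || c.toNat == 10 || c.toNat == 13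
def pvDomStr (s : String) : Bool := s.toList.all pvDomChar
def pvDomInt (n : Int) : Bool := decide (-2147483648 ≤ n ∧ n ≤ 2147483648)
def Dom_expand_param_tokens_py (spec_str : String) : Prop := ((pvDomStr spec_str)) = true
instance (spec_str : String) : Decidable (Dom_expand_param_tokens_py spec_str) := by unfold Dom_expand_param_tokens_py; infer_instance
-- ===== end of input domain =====

-- B replaces A's per-token rescan of PARAM_REGISTRY by one precomputed expansion dict (one lookup per token);
-- the equivalence is about the RETURN value: the SystemExit A raises on unknown tokens is excluded by Pre_.

-- ===== PORT A =====
-- module constant PARAM_REGISTRY, reduced to the (name, section) fields the function reads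
-- (the remaining registry fields are floats/None/bools and never influence the result)
def pvRegistry : List (String × String) := [("hold_fallback_mode_ms", "profile selection"), ("hold_modes_down_ms", "profile selection"), ("min_between_changes_ms", "profile selection"), ("upward_confidence_loops", "profile selection"), ("fast_downgrade", "profile selection"), ("hysteresis_up_db", "gate"), ("hysteresis_down_db", "gate"), ("snr_slope_alpha", "gate"), ("snr_predict_horizon_ticks", "gate"), ("emergency_loss_rate", "gate"), ("emergency_fec_pressure", "gate"), ("snr_safety_margin", "dynamic"), ("snr_ema_alpha", "dynamic"), ("loss_margin_weight", "dynamic"), ("fec_margin_weight", "dynamic"), ("max_mcs", "dynamic"), ("short_gi_snr_margin", "dynamic"), ("loss_threshold_for_fec_downgrade", "dynamic"), ("fec_redundancy_ratio", "dynamic"), ("utilization_factor", "dynamic"), ("max_bitrate", "dynamic"), ("min_bitrate", "dynamic"), ("max_power", "dynamic"), ("min_power", "dynamic")]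

def pvSectionAlias : PySem.Dict String String := PySem.Dict.ofList [("profile_selection", "profile selection"), ("profile-selection", "profile selection"), ("gate", "gate"), ("dynamic", "dynamic")]

-- ALL_PARAM_NAMES = {p[0] for p in PARAM_REGISTRY}
def pvAllParamNames : PySem.Set String := PySem.Set.ofList (pvRegistry.map (·.1))

-- body of A's for-loop over (selected, unknown)
def pvLoopA (st : PySem.Set String × List String) (tok : String) :
    PySem.Set String × List String :=
  if pvSectionAlias.contains tok then
    let sec := (pvSectionAlias.get? tok).getD ""
    (PySem.Set.update st.1 ((pvRegistry.filter (fun p => p.2 == sec)).map (·.1)), st.2)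
  else if PySem.Set.contains pvAllParamNames tok then
    (PySem.Set.add st.1 tok, st.2)
  else
    (st.1, st.2 ++ [tok])

-- literal transliteration of A; Python raises SystemExit when unknown ≠ [] (excluded by Pre_),
-- the port returns the selected set in that case too
def expand_param_tokens_py (spec_str : String) : List String :=
  let toks := ((((PySem.Str.split? spec_str ",").getD [])).map PySem.Str.strip).filter (fun t => t ≠ "")
  (toks.foldl pvLoopA (PySem.Set.empty, ([] : List String))).1

-- ===== PORT B =====
-- the expansion table Source B builds once: per-section name lists, then alias -> section list, then name -> [name]
def pvExpansion : PySem.Dict String (List String) :=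
  let bySection := pvRegistry.foldl
    (fun (d : PySem.Dict String (List String)) p => d.modify p.2 [] (fun l => l ++ [p.1]))
    PySem.Dict.empty
  let e := pvSectionAlias.items.foldl
    (fun (d : PySem.Dict String (List String)) kv => d.insert kv.1 (bySection.getD kv.2 []))
    PySem.Dict.empty
  pvRegistry.foldl (fun (d : PySem.Dict String (List String)) p => d.insert p.1 [p.1]) e

-- body of Source B's for-loop (skip empty token, one dict lookup)
def pvLoopB (st : PySem.Set String × List String) (tok : String) :
    PySem.Set String × List String :=
  if tok = "" then st
  else
    match pvExpansion.get? tok with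
    | none => (st.1, st.2 ++ [tok])
    | some names => (PySem.Set.update st.1 names, st.2)

-- literal transliteration of Source B
def expand_param_tokens_py_alt (spec_str : String) : List String :=
  (((((PySem.Str.split? spec_str ",").getD [])).map PySem.Str.strip).foldl
    pvLoopB (PySem.Set.empty, ([] : List String))).1

-- ===== PRECONDITION & SPEC =====
def pvKnownTokens : List String := ["profile_selection", "profile-selection", "gate", "dynamic", "hold_fallback_mode_ms", "hold_modes_down_ms", "min_between_changes_ms", "upward_confidence_loops", "fast_downgrade", "hysteresis_up_db", "hysteresis_down_db", "snr_slope_alpha", "snr_predict_horizon_ticks", "emergency_loss_rate", "emergency_fec_pressure", "snr_safety_margin", "snr_ema_alpha", "loss_margin_weight", "fec_margin_weight", "max_mcs", "short_gi_snr_margin", "loss_threshold_for_fec_downgrade", "fec_redundancy_ratio", "utilization_factor", "max_bitrate", "min_bitrate", "max_power", "min_power"]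

-- Pre_ excludes exactly the inputs containing an unknown non-empty token, on which Python A raises SystemExit
def Pre_expand_param_tokens_py (spec_str : String) : Prop :=
  ∀ t ∈ (((PySem.Str.split? spec_str ",").getD [])).map PySem.Str.strip, t = "" ∨ t ∈ pvKnownTokens
instance (spec_str : String) : Decidable (Pre_expand_param_tokens_py spec_str) := by unfold Pre_expand_param_tokens_py; infer_instance

def pvWitness_expand_param_tokens_py : String := "gate, max_power, ,profile_selection"

def Spec_expand_param_tokens_py (spec_str : String) (out : List String) : Prop := out = expand_param_tokens_py_alt spec_str
instance (spec_str : String) (out : List String) : Decidable (Spec_expand_param_tokens_py spec_str out) := by unfold Spec_expand_param_tokens_py; infer_instance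

-- ===== CLAIM (what is proved, stated in full; the proofs are below) =====
def Claim_equal_expand_param_tokens_py : Prop := ∀ (spec_str : String), Dom_expand_param_tokens_py spec_str → Pre_expand_param_tokens_py spec_str → Spec_expand_param_tokens_py spec_str (expand_param_tokens_py spec_str)

-- ===== LEMMAS AND PROOFS =====

-- the effect of one loop iteration on `selected` alone
def pvSelA (s : PySem.Set String) (tok : String) : PySem.Set String :=
  if pvSectionAlias.contains tok then
    PySem.Set.update s ((pvRegistry.filter (fun p => p.2 == (pvSectionAlias.get? tok).getD "")).map (·.1))
  else if PySem.Set.contains pvAllParamNames tok then PySem.Set.add s tok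
  else s

def pvSelB (s : PySem.Set String) (tok : String) : PySem.Set String :=
  if tok = "" then s
  else
    match pvExpansion.get? tok with
    | none => s
    | some names => PySem.Set.update s names

lemma pvLoopA_fst (st : PySem.Set String × List String) (tok : String) :
    (pvLoopA st tok).1 = pvSelA st.1 tok := by
  unfold pvLoopA pvSelA; split_ifs <;> rfl

lemma pvLoopB_fst (st : PySem.Set String × List String) (tok : String) :
    (pvLoopB st tok).1 = pvSelB st.1 tok := by
  unfold pvLoopB pvSelB
  split_ifs with h
  · rfl
  · cases pvExpansion.get? tok <;> rfl

lemma pvFoldA_fst (L : List String) (st : PySem.Set String × List String) :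
    (L.foldl pvLoopA st).1 = L.foldl pvSelA st.1 := by
  induction L generalizing st with
  | nil => rfl
  | cons t L ih => rw [List.foldl_cons, List.foldl_cons, ih, pvLoopA_fst]

lemma pvFoldB_fst (L : List String) (st : PySem.Set String × List String) :
    (L.foldl pvLoopB st).1 = L.foldl pvSelB st.1 := by
  induction L generalizing st with
  | nil => rfl
  | cons t L ih => rw [List.foldl_cons, List.foldl_cons, ih, pvLoopB_fst]

-- A's per-token update of `selected` equals B's, for EVERY token
-- (empty and unknown tokens leave it unchanged on both sides)
lemma pvSel_eq (tok : String) (s : PySem.Set String) : pvSelA s tok = pvSelB s tok := by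
  by_cases h0 : tok = "profile_selection"
  · subst h0; rfl
  by_cases h1 : tok = "profile-selection"
  · subst h1; rfl
  by_cases h2 : tok = "gate"
  · subst h2; rfl
  by_cases h3 : tok = "dynamic"
  · subst h3; rfl
  by_cases h4 : tok = "hold_fallback_mode_ms"
  · subst h4; rfl
  by_cases h5 : tok = "hold_modes_down_ms"
  · subst h5; rfl
  by_cases h6 : tok = "min_between_changes_ms"
  · subst h6; rfl
  by_cases h7 : tok = "upward_confidence_loops"
  · subst h7; rfl
  by_cases h8 : tok = "fast_downgrade"
  · subst h8; rfl
  by_cases h9 : tok = "hysteresis_up_db"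
  · subst h9; rfl
  by_cases h10 : tok = "hysteresis_down_db"
  · subst h10; rfl
  by_cases h11 : tok = "snr_slope_alpha"
  · subst h11; rfl
  by_cases h12 : tok = "snr_predict_horizon_ticks"
  · subst h12; rfl
  by_cases h13 : tok = "emergency_loss_rate"
  · subst h13; rfl
  by_cases h14 : tok = "emergency_fec_pressure"
  · subst h14; rfl
  by_cases h15 : tok = "snr_safety_margin"
  · subst h15; rfl
  by_cases h16 : tok = "snr_ema_alpha"
  · subst h16; rfl
  by_cases h17 : tok = "loss_margin_weight"
  · subst h17; rfl
  by_cases h18 : tok = "fec_margin_weight"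
  · subst h18; rfl
  by_cases h19 : tok = "max_mcs"
  · subst h19; rfl
  by_cases h20 : tok = "short_gi_snr_margin"
  · subst h20; rfl
  by_cases h21 : tok = "loss_threshold_for_fec_downgrade"
  · subst h21; rfl
  by_cases h22 : tok = "fec_redundancy_ratio"
  · subst h22; rfl
  by_cases h23 : tok = "utilization_factor"
  · subst h23; rfl
  by_cases h24 : tok = "max_bitrate"
  · subst h24; rfl
  by_cases h25 : tok = "min_bitrate"
  · subst h25; rfl
  by_cases h26 : tok = "max_power"
  · subst h26; rfl
  by_cases h27 : tok = "min_power"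
  · subst h27; rfl
  have hE : pvExpansion = PySem.Dict.mk [("profile_selection", ["hold_fallback_mode_ms", "hold_modes_down_ms", "min_between_changes_ms", "upward_confidence_loops", "fast_downgrade"]), ("profile-selection", ["hold_fallback_mode_ms", "hold_modes_down_ms", "min_between_changes_ms", "upward_confidence_loops", "fast_downgrade"]), ("gate", ["hysteresis_up_db", "hysteresis_down_db", "snr_slope_alpha", "snr_predict_horizon_ticks", "emergency_loss_rate", "emergency_fec_pressure"]), ("dynamic", ["snr_safety_margin", "snr_ema_alpha", "loss_margin_weight", "fec_margin_weight", "max_mcs", "short_gi_snr_margin", "loss_threshold_for_fec_downgrade", "fec_redundancy_ratio", "utilization_factor", "max_bitrate", "min_bitrate", "max_power", "min_power"]), ("hold_fallback_mode_ms", ["hold_fallback_mode_ms"]), ("hold_modes_down_ms", ["hold_modes_down_ms"]), ("min_between_changes_ms", ["min_between_changes_ms"]), ("upward_confidence_loops", ["upward_confidence_loops"]), ("fast_downgrade", ["fast_downgrade"]), ("hysteresis_up_db", ["hysteresis_up_db"]), ("hysteresis_down_db", ["hysteresis_down_db"]), ("snr_slope_alpha", ["snr_slope_alpha"]), ("snr_predict_horizon_ticks",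 ["snr_predict_horizon_ticks"]), ("emergency_loss_rate", ["emergency_loss_rate"]), ("emergency_fec_pressure", ["emergency_fec_pressure"]), ("snr_safety_margin", ["snr_safety_margin"]), ("snr_ema_alpha", ["snr_ema_alpha"]), ("loss_margin_weight", ["loss_margin_weight"]), ("fec_margin_weight", ["fec_margin_weight"]), ("max_mcs", ["max_mcs"]), ("short_gi_snr_margin", ["short_gi_snr_margin"]), ("loss_threshold_for_fec_downgrade", ["loss_threshold_for_fec_downgrade"]), ("fec_redundancy_ratio", ["fec_redundancy_ratio"]), ("utilization_factor", ["utilization_factor"]), ("max_bitrate", ["max_bitrate"]), ("min_bitrate", ["min_bitrate"]), ("max_power", ["max_power"]), ("min_power", ["min_power"])] := by rfl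
  have hget : pvExpansion.get? tok = none := by
    rw [hE]; simp [PySem.Dict.get?, Ne.symm h0, Ne.symm h1, Ne.symm h2, Ne.symm h3, Ne.symm h4, Ne.symm h5, Ne.symm h6, Ne.symm h7, Ne.symm h8, Ne.symm h9, Ne.symm h10, Ne.symm h11, Ne.symm h12, Ne.symm h13, Ne.symm h14, Ne.symm h15, Ne.symm h16, Ne.symm h17, Ne.symm h18, Ne.symm h19, Ne.symm h20, Ne.symm h21, Ne.symm h22, Ne.symm h23, Ne.symm h24, Ne.symm h25, Ne.symm h26, Ne.symm h27]
  have hS : pvSectionAlias = PySem.Dict.mk [("profile_selection", "profile selection"), ("profile-selection", "profile selection"), ("gate", "gate"), ("dynamic", "dynamic")] := by rfl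
  have hc1 : pvSectionAlias.contains tok = false := by
    rw [hS]; simp [PySem.Dict.contains, PySem.Dict.get?, Ne.symm h0, Ne.symm h1, Ne.symm h2, Ne.symm h3]
  have hc2 : PySem.Set.contains pvAllParamNames tok = false := by
    have hN : pvAllParamNames = pvRegistry.map (·.1) := by rfl
    rw [hN]; simp [pvRegistry, PySem.Set.contains, h4, h5, h6, h7, h8, h9, h10, h11, h12, h13, h14, h15, h16, h17, h18, h19, h20, h21, h22, h23, h24, h25, h26, h27]
  unfold pvSelA pvSelB
  rw [hc1, hc2, hget]
  simp

lemma pvFold_eq (L : List String) (s : PySem.Set String) :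
    (L.filter (fun t => t ≠ "")).foldl pvSelA s = L.foldl pvSelB s := by
  induction L generalizing s with
  | nil => rfl
  | cons t L ih =>
    by_cases ht : t = ""
    · subst ht
      have h1 : ("" :: L).filter (fun t => t ≠ "") = L.filter (fun t => t ≠ "") := by simp
      rw [h1, List.foldl_cons]
      exact ih s
    · have h1 : (t :: L).filter (fun t => t ≠ "") = t :: L.filter (fun t => t ≠ "") := by
        simp [ht]
      rw [h1, List.foldl_cons, List.foldl_cons, pvSel_eq]
      exact ih _

-- ===== VERDICT (by name: the statement is the Claim_ definition above) =====
theorem expand_param_tokens_py_spec : Claim_equal_expand_param_tokens_py := by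
  intro spec_str _ _
  unfold Spec_expand_param_tokens_py expand_param_tokens_py expand_param_tokens_py_alt
  rw [pvFoldA_fst, pvFoldB_fst]
  exact pvFold_eq _ _
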